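-- pv_equiv track=rewrite | github.com/glockpete/Forecastin | scripts/golden_source_updater.py | update_artifacts
-- ===== SOURCE A (Python) =====
-- ARTIFACTS_HEADER = "## 6. Artefacts"
--
-- def find_section_indices(content_lines, header_text):
--     """Finds the start index of a header and the start index of the next major section."""
--     start_index = -1
--     end_index = len(content_lines)
--
--     for i, line in enumerate(content_lines):
--         stripped_line = line.strip()
--         if stripped_line.startswith(header_text):
--             start_index = i
--         elif start_index != -1 and (stripped_line.startswith('## ') or stripped_line.startswith('---')):
--             end_index = i
--             break
--
--     return start_index, end_index
--
-- def update_artifacts(content_lines, artefact_paths):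
--     """Adds artefact links to Section 6. Artefacts."""
--
--     artifacts_start, artifacts_end = find_section_indices(content_lines, ARTIFACTS_HEADER)
--     if artifacts_start == -1:
--         return content_lines, "Warning: Artefacts header not found. Skipping artefact update."
--
--     # Find insertion point: after '### Core Implementation Files' if it exists, otherwise after header.
--     insert_point = artifacts_start + 1
--     core_files_start = -1
--
--     for i in range(artifacts_start + 1, artifacts_end):
--         if content_lines[i].strip() == "### Core Implementation Files":
--             core_files_start = i
--             break
--
--     if core_files_start != -1:
--         insert_point = core_files_start + 1
--         # Find end of list under this subsection
--         while insert_point < artifacts_end and content_lines[insert_point].strip().startswith('-'):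
--             insert_point += 1
--
--
--     new_lines = []
--     for path in artefact_paths:
--         # Requirement 5 & 6: Add artefact links using deterministic formatting
--         new_lines.append(f"- [`{path}`]({path})\n")
--
--     if not new_lines:
--         return content_lines, None
--
--     # Insert new lines
--     content_lines[insert_point:insert_point] = new_lines
--
--     return content_lines, None
-- ===== SOURCE B (Python) =====
-- ARTIFACTS_HEADER = "## 6. Artefacts"
--
-- def update_artifacts(content_lines, artefact_paths):
--     """Adds artefact links to Section 6. Artefacts (single pass; mutates content_lines like A)."""
--     header_index = -1
--     core_cursor = -1
--     scanning_list = False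
--     for i, line in enumerate(content_lines):
--         s = line.strip()
--         if s.startswith(ARTIFACTS_HEADER):
--             header_index = i
--             core_cursor = -1
--             scanning_list = False
--         elif header_index == -1:
--             continue
--         elif s.startswith('## ') or s.startswith('---'):
--             break
--         elif scanning_list and s.startswith('-'):
--             core_cursor = i + 1
--         elif core_cursor == -1 and s == "### Core Implementation Files":
--             core_cursor = i + 1
--             scanning_list = True
--         else:
--             scanning_list = False
--
--     if header_index == -1:
--         return content_lines, "Warning: Artefacts header not found. Skipping artefact update."
--     if not artefact_paths:
--         return content_lines, None
--     insert_point = core_cursor if core_cursor != -1 else header_index + 1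
--     new_lines = [f"- [`{path}`]({path})\n" for path in artefact_paths]
--     content_lines[insert_point:insert_point] = new_lines
--     return content_lines, None
-- ===== Notes on version B (the rewrite author's own statement) =====
-- stated objective: alternative
-- what changed: B replaces A's three separate scans (header/section-end search via find_section_indices, a second indexed scan for the '### Core Implementation Files' line, and a while loop over the bullet list) with a single pass over content_lines maintaining a small state machine (header index, insert cursor, in-list flag).
import Mathlib
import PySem

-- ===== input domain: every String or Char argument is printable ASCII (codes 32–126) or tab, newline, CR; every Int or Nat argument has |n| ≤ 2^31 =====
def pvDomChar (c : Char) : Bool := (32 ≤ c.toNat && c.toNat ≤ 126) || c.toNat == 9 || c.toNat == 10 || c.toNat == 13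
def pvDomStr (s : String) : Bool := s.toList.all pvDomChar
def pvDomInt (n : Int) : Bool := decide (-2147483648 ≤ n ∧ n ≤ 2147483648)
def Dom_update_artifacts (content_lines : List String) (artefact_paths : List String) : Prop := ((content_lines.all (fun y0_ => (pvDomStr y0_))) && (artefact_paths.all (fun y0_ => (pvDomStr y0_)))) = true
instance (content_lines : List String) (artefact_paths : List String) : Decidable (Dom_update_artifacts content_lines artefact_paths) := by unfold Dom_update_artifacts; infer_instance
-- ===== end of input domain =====

-- B replaces A's three separate index scans (header/section-end search, core-subsection search,
-- list-end while loop) by ONE pass over the lines with a small state machine; return values are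
-- proved equal (both A and B also splice the new lines into the list the same way).

def pvHeader : String := "## 6. Artefacts"

-- ===== PORT A =====
-- the for-loop of find_section_indices, carrying the loop index i
def pvFsiGo (header_text : String) : List String → Int → Int → Int → Int × Int
  | [], _, start_index, end_index => (start_index, end_index)
  | line :: rest, i, start_index, end_index =>
    let s := PySem.Str.strip line
    if PySem.Str.startswith s header_text then
      pvFsiGo header_text rest (i + 1) i end_index
    else if !(start_index == -1) && (PySem.Str.startswith s "## " || PySem.Str.startswith s "---") then
      (start_index, i)
    else
      pvFsiGo header_text rest (i + 1) start_index end_index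

def find_section_indices (content_lines : List String) (header_text : String) : Int × Int :=
  pvFsiGo header_text content_lines 0 (-1) (content_lines.length : Int)

-- the 'for i in range(artifacts_start + 1, artifacts_end)' loop searching the subsection line
def pvCoreGo (content_lines : List String) : List Int → Int
  | [] => -1
  | i :: rest =>
    if PySem.Str.strip (PySem.List.pyGetD content_lines i "") == "### Core Implementation Files" then i
    else pvCoreGo content_lines rest

-- the 'while insert_point < artifacts_end and …' loop (fuel bounds the step count; index stays in range)
def pvAdvGo (content_lines : List String) (artifacts_end : Int) : Nat → Int → Int
  | 0, insert_point => insert_point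
  | fuel + 1, insert_point =>
    if insert_point < artifacts_end then
      if PySem.Str.startswith (PySem.Str.strip (PySem.List.pyGetD content_lines insert_point "")) "-" then
        pvAdvGo content_lines artifacts_end fuel (insert_point + 1)
      else insert_point
    else insert_point

def update_artifacts (content_lines : List String) (artefact_paths : List String) : List String × Option String :=
  let se := find_section_indices content_lines pvHeader
  let artifacts_start := se.1
  let artifacts_end := se.2
  if artifacts_start == -1 then
    (content_lines, some "Warning: Artefacts header not found. Skipping artefact update.")
  else
    let core_files_start := pvCoreGo content_lines (PySem.List.pyRange (artifacts_start + 1) artifacts_end 1)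
    let insert_point :=
      if !(core_files_start == -1) then
        pvAdvGo content_lines artifacts_end (content_lines.length + 1) (core_files_start + 1)
      else artifacts_start + 1
    let new_lines := artefact_paths.map (fun path => "- [`" ++ path ++ "`](" ++ path ++ ")\n")
    if new_lines.isEmpty then (content_lines, none)
    else (content_lines.take insert_point.toNat ++ new_lines ++ content_lines.drop insert_point.toNat, none)

-- ===== PORT B =====
-- single pass; state = (header_index, core_cursor, scanning_list); returns (header_index, core_cursor)
def pvScanGo : List String → Int → Int → Int → Bool → Int × Int
  | [], _, header_index, core_cursor, _ => (header_index, core_cursor)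
  | line :: rest, i, header_index, core_cursor, scanning_list =>
    let s := PySem.Str.strip line
    if PySem.Str.startswith s pvHeader then
      pvScanGo rest (i + 1) i (-1) false
    else if header_index == -1 then
      pvScanGo rest (i + 1) header_index core_cursor scanning_list
    else if PySem.Str.startswith s "## " || PySem.Str.startswith s "---" then
      (header_index, core_cursor)
    else if scanning_list && PySem.Str.startswith s "-" then
      pvScanGo rest (i + 1) header_index (i + 1) true
    else if core_cursor == -1 && (s == "### Core Implementation Files") then
      pvScanGo rest (i + 1) header_index (i + 1) true
    else
      pvScanGo rest (i + 1) header_index core_cursor false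

def update_artifacts_alt (content_lines : List String) (artefact_paths : List String) : List String × Option String :=
  let hc := pvScanGo content_lines 0 (-1) (-1) false
  if hc.1 == -1 then
    (content_lines, some "Warning: Artefacts header not found. Skipping artefact update.")
  else if artefact_paths.isEmpty then (content_lines, none)
  else
    let insert_point := if !(hc.2 == -1) then hc.2 else hc.1 + 1
    let new_lines := artefact_paths.map (fun path => "- [`" ++ path ++ "`](" ++ path ++ ")\n")
    (content_lines.take insert_point.toNat ++ new_lines ++ content_lines.drop insert_point.toNat, none)

-- ===== PRECONDITION & SPEC =====
def Spec_update_artifacts (content_lines : List String) (artefact_paths : List String) (out : List String × Option String) : Prop := out = update_artifacts_alt content_lines artefact_paths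
instance (content_lines : List String) (artefact_paths : List String) (out : List String × Option String) : Decidable (Spec_update_artifacts content_lines artefact_paths out) := by unfold Spec_update_artifacts; infer_instance

-- ===== CLAIM (what is proved, stated in full; the proofs are below) =====
def Claim_equal_update_artifacts : Prop := ∀ (content_lines : List String) (artefact_paths : List String), Dom_update_artifacts content_lines artefact_paths → Spec_update_artifacts content_lines artefact_paths (update_artifacts content_lines artefact_paths)

-- ===== LEMMAS AND PROOFS =====

def pvIsCore (l : String) : Bool := PySem.Str.strip l == "### Core Implementation Files"
def pvIsDash (l : String) : Bool := PySem.Str.startswith (PySem.Str.strip l) "-"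

-- what A computes after the header: core search over (st, en) then the while loop
def pvAFin (cl : List String) (st en : Int) : Int :=
  let c := pvCoreGo cl (PySem.List.pyRange (st + 1) en 1)
  if c = -1 then -1 else pvAdvGo cl en (cl.length + 1) (c + 1)

-- B's loop state at position i, described declaratively
def pvInv (cl : List String) (i : Nat) (st cc : Int) (sc : Bool) : Prop :=
  (st = -1 ∧ cc = -1 ∧ sc = false) ∨
  (∃ stN : Nat, st = (stN : Int) ∧ stN < i ∧
    ((cc = -1 ∧ sc = false ∧ ∀ j, stN < j → j < i → pvIsCore (cl.getD j "") = false) ∨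
     (∃ cN : Nat, stN < cN ∧ cN < i ∧ pvIsCore (cl.getD cN "") = true ∧
       (∀ j, stN < j → j < cN → pvIsCore (cl.getD j "") = false) ∧
       ((sc = true ∧ cc = (i : Int) ∧ ∀ j, cN < j → j < i → pvIsDash (cl.getD j "") = true) ∨
        (sc = false ∧ ∃ qN : Nat, cc = (qN : Int) ∧ cN < qN ∧ qN < i ∧
          (∀ j, cN < j → j < qN → pvIsDash (cl.getD j "") = true) ∧
          pvIsDash (cl.getD qN "") = false)))))

lemma pvCoreGo_none (cl : List String) :
    ∀ n a b : Nat, b - a ≤ n → (∀ j, a ≤ j → j < b → pvIsCore (cl.getD j "") = false) →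
      pvCoreGo cl (PySem.List.pyRange (a : Int) (b : Int) 1) = -1 := by
  intro n
  induction n with
  | zero =>
    intro a b hn _
    rw [PySem.List.pyRange_one_eq_nil (by omega : (b : Int) ≤ (a : Int))]
    rfl
  | succ n ih =>
    intro a b hn hno
    rcases le_or_gt b a with hba | hab
    · rw [PySem.List.pyRange_one_eq_nil (by exact_mod_cast hba)]
      rfl
    · rw [PySem.List.pyRange_one_cons (by exact_mod_cast hab)]
      unfold pvCoreGo
      have hc := hno a le_rfl hab
      simp only [pvIsCore, PySem.List.pyGetD_natCast] at hc ⊢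
      rw [hc]
      simp only [Bool.false_eq_true, if_false]
      have : ((a : Int) + 1) = ((a + 1 : Nat) : Int) := by push_cast; ring
      rw [this]
      exact ih (a + 1) b (by omega) (fun j h1 h2 => hno j (by omega) h2)
lemma pvCoreGo_found (cl : List String) :
    ∀ n a b c : Nat, b - a ≤ n → a ≤ c → c < b → pvIsCore (cl.getD c "") = true →
      (∀ j, a ≤ j → j < c → pvIsCore (cl.getD j "") = false) →
      pvCoreGo cl (PySem.List.pyRange (a : Int) (b : Int) 1) = (c : Int) := by
  intro n
  induction n with
  | zero => intro a b c hn hac hcb _ _; omega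
  | succ n ih =>
    intro a b c hn hac hcb hcore hno
    rw [PySem.List.pyRange_one_cons (by exact_mod_cast (by omega : a < b))]
    unfold pvCoreGo
    rcases Nat.eq_or_lt_of_le hac with heq | hlt
    · subst heq
      simp only [pvIsCore, PySem.List.pyGetD_natCast] at hcore ⊢
      rw [hcore]; simp
    · have hc := hno a le_rfl hlt
      simp only [pvIsCore, PySem.List.pyGetD_natCast] at hc ⊢
      rw [hc]
      simp only [Bool.false_eq_true, if_false]
      have : ((a : Int) + 1) = ((a + 1 : Nat) : Int) := by push_cast; ring
      rw [this]
      exact ih (a + 1) b c (by omega) (by omega) hcb (by simpa [pvIsCore] using hcore)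
        (fun j h1 h2 => hno j (by omega) h2)

lemma pvAdvGo_eq (cl : List String) :
    ∀ fuel p q en : Nat, q - p < fuel → p ≤ q → q ≤ en →
      (∀ j, p ≤ j → j < q → pvIsDash (cl.getD j "") = true) →
      (q = en ∨ pvIsDash (cl.getD q "") = false) →
      pvAdvGo cl (en : Int) fuel (p : Int) = (q : Int) := by
  intro fuel
  induction fuel with
  | zero => intro p q en h; omega
  | succ fuel ih =>
    intro p q en hf hpq hqe hdash hstop
    unfold pvAdvGo
    rcases Nat.eq_or_lt_of_le hpq with heq | hlt
    · subst heq
      rcases hstop with hqen | hnd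
      · subst hqen; simp
      · by_cases hpe : (p : Int) < (en : Int)
        · rw [if_pos hpe]
          simp only [pvIsDash, PySem.List.pyGetD_natCast] at hnd ⊢
          rw [hnd]
          simp
        · rw [if_neg hpe]
    · have hpe : (p : Int) < (en : Int) := by exact_mod_cast (by omega : p < en)
      rw [if_pos hpe]
      have hd := hdash p le_rfl hlt
      simp only [pvIsDash, PySem.List.pyGetD_natCast] at hd ⊢
      rw [hd]
      simp only [if_true]
      have : ((p : Int) + 1) = ((p + 1 : Nat) : Int) := by push_cast; ring
      rw [this]
      exact ih (p + 1) q en (by omega) (by omega) hqe (fun j h1 h2 => hdash j (by omega) h2) hstop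

lemma pvAdvGo_nonneg (cl : List String) (en : Int) :
    ∀ fuel (p : Int), 0 ≤ p → 0 ≤ pvAdvGo cl en fuel p := by
  intro fuel
  induction fuel with
  | zero => intro p hp; exact hp
  | succ fuel ih =>
    intro p hp
    unfold pvAdvGo
    split
    · split
      · exact ih (p + 1) (by omega)
      · exact hp
    · exact hp

lemma pvCoreGo_ge (cl : List String) :
    ∀ r : List Int, (∀ x ∈ r, 0 ≤ x) → pvCoreGo cl r = -1 ∨ 0 ≤ pvCoreGo cl r := by
  intro r
  induction r with
  | nil => intro _; left; rfl
  | cons x rest ih =>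
    intro h
    unfold pvCoreGo
    split
    · right; exact h x (List.mem_cons_self)
    · exact ih (fun y hy => h y (List.mem_cons_of_mem _ hy))

lemma pvFin_of_inv (cl : List String) (i : Nat) (stN : Nat) (cc : Int) (sc : Bool)
    (hinv : pvInv cl i (stN : Int) cc sc) (hi : i ≤ cl.length) :
    pvAFin cl (stN : Int) (i : Int) = cc := by
  unfold pvAFin
  rcases hinv with ⟨hst, _, _⟩ | ⟨stN', hst, hlt, hcase⟩
  · omega
  · have hstN : stN = stN' := by exact_mod_cast hst
    subst hstN
    have hcast : ((stN : Int) + 1) = ((stN + 1 : Nat) : Int) := by push_cast; ring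
    rcases hcase with ⟨hcc, _, hno⟩ | ⟨cN, hsc, hci, hcore, hno, hrest⟩
    · rw [hcast, pvCoreGo_none cl i (stN + 1) i (by omega)
        (fun j h1 h2 => hno j (by omega) h2)]
      simp [hcc]
    · rw [hcast, pvCoreGo_found cl i (stN + 1) i cN (by omega) (by omega) hci hcore
        (fun j h1 h2 => hno j (by omega) h2)]
      have hne : ¬ ((cN : Int) = -1) := by omega
      rw [if_neg hne]
      have hcast2 : ((cN : Int) + 1) = ((cN + 1 : Nat) : Int) := by push_cast; ring
      rw [hcast2]
      rcases hrest with ⟨hsc', hcc, hdash⟩ | ⟨hsc', qN, hcc, hcq, hqi, hdash, hnd⟩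
      · rw [pvAdvGo_eq cl (cl.length + 1) (cN + 1) i i (by omega) (by omega) le_rfl
          (fun j h1 h2 => hdash j (by omega) h2) (Or.inl rfl)]
        exact hcc.symm
      · rw [pvAdvGo_eq cl (cl.length + 1) (cN + 1) qN i (by omega) (by omega) (by omega)
          (fun j h1 h2 => hdash j (by omega) h2) (Or.inr hnd)]
        exact hcc.symm

lemma pvScan_eq (cl : List String) :
    ∀ ls : List String, ∀ i : Nat, ∀ st cc : Int, ∀ sc : Bool,
      cl.drop i = ls → i ≤ cl.length → pvInv cl i st cc sc →
      pvScanGo ls (i : Int) st cc sc =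
        (let r := pvFsiGo pvHeader ls (i : Int) st (cl.length : Int);
         (r.1, if r.1 = -1 then -1 else pvAFin cl r.1 r.2)) := by
  intro ls
  induction ls with
  | nil =>
    intro i st cc sc hdrop hi hinv
    have hil : i = cl.length := by
      have := List.drop_eq_nil_iff.mp hdrop
      omega
    subst hil
    simp only [pvScanGo, pvFsiGo]
    rcases hinv with ⟨hst, hcc, _⟩ | ⟨stN, hst, hlt, hcase⟩
    · subst hst; simp [hcc]
    · subst hst
      rw [if_neg (by omega : ¬ ((stN : Int) = -1))]
      rw [pvFin_of_inv cl cl.length stN cc sc (Or.inr ⟨stN, rfl, hlt, hcase⟩) le_rfl]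
  | cons l rest ih =>
    intro i st cc sc hdrop hi hinv
    have hlen : i < cl.length := by
      by_contra h
      rw [List.drop_eq_nil_iff.mpr (by omega)] at hdrop
      exact List.cons_ne_nil _ _ hdrop.symm
    have hget : cl.getD i "" = l := by
      have h0 : cl[i]? = some l := by
        have h := congrArg (fun t : List String => t[0]?) hdrop
        simpa using h
      simp [List.getD_eq_getElem?_getD, h0]
    have hrest : cl.drop (i + 1) = rest := by
      have : cl.drop (i + 1) = (cl.drop i).drop 1 := by
        rw [List.drop_drop]
      rw [this, hdrop]
      rfl
    have hcast : ((i : Int) + 1) = ((i + 1 : Nat) : Int) := by push_cast; ring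
    simp only [pvScanGo, pvFsiGo]
    by_cases h1 : PySem.Str.startswith (PySem.Str.strip l) pvHeader = true
    · rw [if_pos h1, if_pos h1, hcast]
      exact ih (i + 1) (i : Int) (-1) false hrest (by omega)
        (Or.inr ⟨i, rfl, by omega, Or.inl ⟨rfl, rfl, by omega⟩⟩)
    · rw [if_neg h1, if_neg h1]
      by_cases h2 : st = -1
      · subst h2
        have hccsc : cc = -1 ∧ sc = false := by
          rcases hinv with ⟨_, hcc, hsc⟩ | ⟨stN, hst, _, _⟩
          · exact ⟨hcc, hsc⟩
          · omega
        rw [if_pos (by simp), hccsc.1, hccsc.2]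
        have hcond : (!((-1 : Int) == -1) && (PySem.Str.startswith (PySem.Str.strip l) "## " || PySem.Str.startswith (PySem.Str.strip l) "---")) = false := by
          simp
        rw [hcond]
        simp only [Bool.false_eq_true, if_false]
        rw [hcast]
        exact ih (i + 1) (-1) (-1) false hrest (by omega) (Or.inl ⟨rfl, rfl, rfl⟩)
      · have hinvKeep := hinv
        obtain ⟨stN, hst, hltN, hcase⟩ :
            ∃ stN : Nat, st = (stN : Int) ∧ stN < i ∧
              ((cc = -1 ∧ sc = false ∧ ∀ j, stN < j → j < i → pvIsCore (cl.getD j "") = false) ∨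
               (∃ cN : Nat, stN < cN ∧ cN < i ∧ pvIsCore (cl.getD cN "") = true ∧
                 (∀ j, stN < j → j < cN → pvIsCore (cl.getD j "") = false) ∧
                 ((sc = true ∧ cc = (i : Int) ∧ ∀ j, cN < j → j < i → pvIsDash (cl.getD j "") = true) ∨
                  (sc = false ∧ ∃ qN : Nat, cc = (qN : Int) ∧ cN < qN ∧ qN < i ∧
                    (∀ j, cN < j → j < qN → pvIsDash (cl.getD j "") = true) ∧
                    pvIsDash (cl.getD qN "") = false)))) := by
          rcases hinv with ⟨hst, _, _⟩ | h
          · exact absurd hst h2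
          · exact h
        rw [if_neg (by simpa using h2)]
        by_cases h3 : (PySem.Str.startswith (PySem.Str.strip l) "## " || PySem.Str.startswith (PySem.Str.strip l) "---") = true
        · have hcond : (!(st == -1) && (PySem.Str.startswith (PySem.Str.strip l) "## " || PySem.Str.startswith (PySem.Str.strip l) "---")) = true := by
            rw [h3]; simp [h2]
          rw [hcond, if_pos h3]
          simp only [if_true]
          rw [if_neg h2]
          subst hst
          rw [pvFin_of_inv cl i stN cc sc hinvKeep (by omega)]
        · have hcond : (!(st == -1) && (PySem.Str.startswith (PySem.Str.strip l) "## " || PySem.Str.startswith (PySem.Str.strip l) "---")) = false := by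
            rw [Bool.eq_false_iff.mpr h3, Bool.and_false]
          rw [hcond, if_neg h3]
          simp only [Bool.false_eq_true, if_false]
          subst hst
          by_cases h4 : (sc && PySem.Str.startswith (PySem.Str.strip l) "-") = true
          · rw [if_pos h4, hcast]
            obtain ⟨hsc, hdl⟩ := Bool.and_eq_true_iff.mp h4
            have hinv' : pvInv cl (i + 1) (stN : Int) ((i : Int) + 1) true := by
              rcases hcase with ⟨_, hscf, _⟩ | ⟨cN, hsc1, hci, hcore, hno, hrest2⟩
              · rw [hsc] at hscf; cases hscf
              · rcases hrest2 with ⟨_, hcc, hdash⟩ | ⟨hscf, _⟩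
                · refine Or.inr ⟨stN, rfl, by omega, Or.inr ⟨cN, hsc1, by omega, hcore, hno,
                    Or.inl ⟨rfl, by push_cast; ring, ?_⟩⟩⟩
                  intro j hj1 hj2
                  rcases Nat.lt_or_ge j i with hji | hji
                  · exact hdash j hj1 hji
                  · have : j = i := by omega
                    subst this
                    rw [hget]
                    exact hdl
                · rw [hsc] at hscf; cases hscf
            exact ih (i + 1) (stN : Int) (((i + 1 : Nat)) : Int) true hrest (by omega)
              (by rw [← hcast]; exact hinv')
          · rw [if_neg (by simpa using h4)]
            by_cases h5 : (cc == -1 && (PySem.Str.strip l == "### Core Implementation Files")) = true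
            · rw [if_pos h5, hcast]
              obtain ⟨hcc1, hcore1⟩ := Bool.and_eq_true_iff.mp h5
              have hcc : cc = -1 := by simpa using hcc1
              have hinv' : pvInv cl (i + 1) (stN : Int) ((i : Int) + 1) true := by
                rcases hcase with ⟨_, _, hno⟩ | ⟨cN, _, _, _, _, hrest2⟩
                · refine Or.inr ⟨stN, rfl, by omega, Or.inr ⟨i, hltN, by omega, ?_, ?_,
                    Or.inl ⟨rfl, by push_cast; ring, by omega⟩⟩⟩
                  · rw [hget]; simpa [pvIsCore] using hcore1
                  · intro j hj1 hj2; exact hno j hj1 hj2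
                · rcases hrest2 with ⟨_, hcc2, _⟩ | ⟨_, qN, hcc2, _, _, _, _⟩ <;> omega
              exact ih (i + 1) (stN : Int) ((i : Int) + 1) true hrest (by omega) hinv'
            · rw [if_neg (by simpa using h5), hcast]
              have hinv' : pvInv cl (i + 1) (stN : Int) cc false := by
                rcases hcase with ⟨hcc, hscf, hno⟩ | ⟨cN, hsc1, hci, hcore, hno, hrest2⟩
                · refine Or.inr ⟨stN, rfl, by omega, Or.inl ⟨hcc, rfl, ?_⟩⟩
                  intro j hj1 hj2
                  rcases Nat.lt_or_ge j i with hji | hji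
                  · exact hno j hj1 hji
                  · have : j = i := by omega
                    subst this
                    rw [hget]
                    have : ¬ (PySem.Str.strip l == "### Core Implementation Files") = true := by
                      intro hcr
                      exact h5 (by rw [hcc, hcr]; rfl)
                    simpa [pvIsCore] using this
                · rcases hrest2 with ⟨hsct, hcc, hdash⟩ | ⟨hscf, qN, hcc, hcq, hqi, hdash, hnd⟩
                  · -- sc was true, line not a dash: the cursor freezes at i
                    have hnd : pvIsDash (cl.getD i "") = false := by
                      rw [hget]
                      have : ¬ PySem.Str.startswith (PySem.Str.strip l) "-" = true := by
                        intro hd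
                        exact h4 (by rw [hsct, hd]; rfl)
                      simpa [pvIsDash] using this
                    exact Or.inr ⟨stN, rfl, by omega, Or.inr ⟨cN, hsc1, by omega, hcore, hno,
                      Or.inr ⟨rfl, i, hcc, by omega, by omega, hdash, hnd⟩⟩⟩
                  · exact Or.inr ⟨stN, rfl, by omega, Or.inr ⟨cN, hsc1, by omega, hcore, hno,
                      Or.inr ⟨rfl, qN, hcc, hcq, by omega, hdash, hnd⟩⟩⟩
              exact ih (i + 1) (stN : Int) cc false hrest (by omega) hinv'

lemma pvFsiGo_fst (header : String) :
    ∀ ls : List String, ∀ i st de : Int, (st = -1 ∨ 0 ≤ st) → 0 ≤ i →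
      ((pvFsiGo header ls i st de).1 = -1 ∨ 0 ≤ (pvFsiGo header ls i st de).1) := by
  intro ls
  induction ls with
  | nil => intro i st de hst _; exact hst
  | cons l rest ih =>
    intro i st de hst hi
    simp only [pvFsiGo]
    split
    · exact ih (i + 1) i de (Or.inr hi) (by omega)
    · split
      · exact hst
      · exact ih (i + 1) st de hst (by omega)

-- ===== VERDICT (by name: the statement is the Claim_ definition above) =====
theorem update_artifacts_spec : Claim_equal_update_artifacts := by
  intro cl ap _
  unfold Spec_update_artifacts update_artifacts update_artifacts_alt find_section_indices
  have hscan := pvScan_eq cl cl 0 (-1) (-1) false rfl (Nat.zero_le _) (Or.inl ⟨rfl, rfl, rfl⟩)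
  simp only [Nat.cast_zero] at hscan
  rw [hscan]
  simp only []
  set r := pvFsiGo pvHeader cl 0 (-1) (cl.length : Int) with hr
  by_cases hst : r.1 = -1
  · simp [hst]
  · have hstb : (r.1 == -1) = false := by simp [hst]
    rw [hstb]
    simp only [Bool.false_eq_true, if_false]
    rw [if_neg hst]
    have hst0 : 0 ≤ r.1 := by
      rcases pvFsiGo_fst pvHeader cl 0 (-1) (cl.length : Int) (Or.inl rfl) le_rfl with h | h
      · exact absurd h hst
      · exact h
    rcases ap with _ | ⟨p, ps⟩
    · simp
    · simp only [List.map_cons, List.isEmpty_cons, Bool.false_eq_true, if_false]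
      simp only [pvAFin]
      set c := pvCoreGo cl (PySem.List.pyRange (r.1 + 1) r.2 1) with hc
      by_cases hcn : c = -1
      · rw [if_pos hcn]
        have hcb : (c == -1) = true := by simp [hcn]
        rw [hcb]
        simp
      · rw [if_neg hcn]
        have hcb : (c == -1) = false := by simp [hcn]
        rw [hcb]
        have hrange : ∀ x ∈ PySem.List.pyRange (r.1 + 1) r.2 1, 0 ≤ x := by
          intro x hx
          have := (PySem.List.mem_pyRange_one).mp hx
          omega
        have hc0 : 0 ≤ c := by
          rcases pvCoreGo_ge cl (PySem.List.pyRange (r.1 + 1) r.2 1) hrange with h | h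
          · exact absurd (hc ▸ h) hcn
          · exact hc ▸ h
        have hadv : 0 ≤ pvAdvGo cl r.2 (cl.length + 1) (c + 1) :=
          pvAdvGo_nonneg cl r.2 (cl.length + 1) (c + 1) (by omega)
        have hab : (pvAdvGo cl r.2 (cl.length + 1) (c + 1) == -1) = false := by
          simp only [beq_eq_false_iff_ne, ne_eq]
          omega
        rw [hab]
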